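-- pv_equiv track=rewrite | github.com/vikinam97/LeetHub | 890-find-and-replace-pattern/890-find-and-replace-pattern.py | colorCode
-- ===== SOURCE A (Python) =====
-- def colorCode(word):
--     hashMap = {}
--     count = 0
--     code = []
--     for i in range(len(word)):
--         if word[i] not in hashMap:
--             count += 1
--             hashMap[word[i]] = count
--         code.append(str(hashMap[word[i]]))
--     return "#".join(code)
-- ===== SOURCE B (Python) =====
-- def colorCode(word):
--     code = {c: len(set(word[:word.find(c) + 1])) for c in set(word)}
--     return "#".join(str(code[c]) for c in word)
-- ===== Notes on version B (the rewrite author's own statement) =====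
-- stated objective: alternative
-- what changed: B drops A's incremental counter/hash-map loop entirely: each letter's code is computed independently as the number of distinct characters in the prefix ending at that letter's first occurrence (len(set(word[:word.find(c)+1]))), memoised once per distinct character, then mapped over the word.
import Mathlib
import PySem

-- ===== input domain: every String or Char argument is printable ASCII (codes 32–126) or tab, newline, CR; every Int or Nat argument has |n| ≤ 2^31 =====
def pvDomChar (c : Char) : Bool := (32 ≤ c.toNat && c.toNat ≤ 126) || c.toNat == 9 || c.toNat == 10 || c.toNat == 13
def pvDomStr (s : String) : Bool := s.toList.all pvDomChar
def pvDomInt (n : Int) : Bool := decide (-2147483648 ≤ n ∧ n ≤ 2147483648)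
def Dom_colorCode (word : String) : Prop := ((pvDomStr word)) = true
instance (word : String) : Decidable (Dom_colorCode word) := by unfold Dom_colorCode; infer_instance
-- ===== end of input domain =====

-- B replaces A's incremental counter/hash-map loop by a per-letter definition: a letter's code is
-- the number of distinct characters in the prefix ending at its first occurrence (no speed claim).

-- ===== PORT A =====
-- loop body of A: membership test, conditional insert with the bumped counter, then append str(hashMap[word[i]])
def colorCodeStep (st : PySem.Dict Char Int × Int × List String) (c : Char) :
    PySem.Dict Char Int × Int × List String :=
  let d := if st.1.contains c then st.1 else st.1.insert c (st.2.1 + 1)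
  let n := if st.1.contains c then st.2.1 else st.2.1 + 1
  -- hashMap[word[i]] always succeeds here (the key was just ensured), so getD 0 is exact
  (d, n, st.2.2 ++ [PySem.Int.toStr ((d.get? c).getD 0)])

def colorCode (word : String) : String :=
  let cs := word.toList
  let st := (PySem.List.pyRange 0 (PySem.Str.len word)).foldl
      (fun st i => colorCodeStep st (PySem.List.pyGetD cs i ' ')) (PySem.Dict.empty, 0, [])
  PySem.Str.join "#" st.2.2

-- ===== PORT B =====
def colorCode_alt (word : String) : String :=
  let cs := word.toList
  -- {c: len(set(word[:word.find(c) + 1])) for c in set(word)}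
  let code : PySem.Dict Char Int :=
    PySem.Dict.ofList ((PySem.Set.ofList cs).map (fun c =>
      (c, PySem.Set.len (PySem.Set.ofList
            (PySem.List.slice cs none (some (PySem.Chars.find cs [c] + 1)))))))
  -- code[c] always succeeds (every c of word is in set(word)), so getD 0 is exact
  PySem.Str.join "#" (cs.map (fun c => PySem.Int.toStr ((code.get? c).getD 0)))

-- ===== PRECONDITION & SPEC =====
def Spec_colorCode (word : String) (out : String) : Prop := out = colorCode_alt word
instance (word : String) (out : String) : Decidable (Spec_colorCode word out) := by unfold Spec_colorCode; infer_instance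

-- ===== CLAIM (what is proved, stated in full; the proofs are below) =====
def Claim_equal_colorCode : Prop := ∀ (word : String), Dom_colorCode word → Spec_colorCode word (colorCode word)

-- ===== LEMMAS AND PROOFS =====

-- the association list A's dict boils down to: first-seen chars paired with 1,2,…
def pvPairs (p : List Char) : List (Char × Int) :=
  (PySem.List.enumerate (PySem.List.dedup p) 0).map (fun q => (q.2, q.1 + 1))

-- the code A and B emit for a character of the word: its first-seen rank
def pvCode (full : List Char) (c : Char) : Int :=
  ((List.idxOf? c (PySem.List.dedup full)).map (fun k => (k : Int) + 1)).getD 0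

lemma get?_enumMap (l : List Char) (s : Int) (c : Char) :
    (PySem.Dict.mk ((PySem.List.enumerate l s).map (fun q => (q.2, q.1 + 1)))).get? c
      = (List.idxOf? c l).map (fun k => s + (k : Int) + 1) := by
  induction l generalizing s with
  | nil => simp [PySem.List.enumerate, PySem.Dict.get?]
  | cons x t ih =>
    rw [PySem.List.enumerate_cons]
    simp only [List.map_cons, PySem.Dict.get?_mk_cons, List.idxOf?_cons]
    by_cases hx : x = c
    · simp [hx]
    · have hbe : (x == c) = false := by simp [hx]
      simp only [hbe, ih]
      cases h : List.idxOf? c t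
      · simp
      · simp; ring

lemma dedup_append_singleton (p : List Char) (c : Char) :
    PySem.List.dedup (p ++ [c])
      = if c ∈ p then PySem.List.dedup p else PySem.List.dedup p ++ [c] := by
  have h : PySem.List.dedup (p ++ [c]) = PySem.Set.add (PySem.List.dedup p) c := by
    simp [PySem.List.dedup, PySem.Set.ofList, List.foldl_append]
  rw [h, PySem.Set.add]
  have hmem : (PySem.List.dedup p).contains c = true ↔ c ∈ p := by
    rw [List.contains_iff_mem]; exact PySem.Set.mem_ofList p c
  by_cases hc : c ∈ p
  · simp [hc]
  · have h2 : ¬ (PySem.List.dedup p).contains c = true := fun h' => hc (hmem.mp h')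
    simp only [if_neg hc, ite_eq_right_iff]
    intro h3; exact absurd h3 h2

lemma dedup_append_prefix (l p : List Char) :
    ∃ t, PySem.List.dedup (p ++ l) = PySem.List.dedup p ++ t := by
  induction l generalizing p with
  | nil => exact ⟨[], by simp⟩
  | cons c l ih =>
    obtain ⟨t, ht⟩ := ih (p ++ [c])
    rw [show p ++ c :: l = (p ++ [c]) ++ l by simp]
    rw [ht, dedup_append_singleton]
    by_cases hc : c ∈ p
    · exact ⟨t, by simp [hc]⟩
    · exact ⟨c :: t, by simp [hc]⟩

lemma idxOf?_dedup_stable (p l : List Char) (c : Char) (h : c ∈ p) :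
    List.idxOf? c (PySem.List.dedup (p ++ l)) = List.idxOf? c (PySem.List.dedup p) := by
  obtain ⟨t, ht⟩ := dedup_append_prefix l p
  rw [ht, ← PySem.List.index?_eq_idxOf?, ← PySem.List.index?_eq_idxOf?]
  exact PySem.List.index?_append_of_mem t ((PySem.Set.mem_ofList p c).mpr h)

lemma map_fst_pvPairs (p : List Char) : (pvPairs p).map Prod.fst = PySem.List.dedup p := by
  simp only [pvPairs, List.map_map]
  have := PySem.List.map_snd_enumerate (PySem.List.dedup p) 0
  convert this using 2

lemma any_fst_beq (l : List (Char × Int)) (c : Char) :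
    (l.any fun p => p.1 == c) = decide (c ∈ List.map Prod.fst l) := by
  induction l with
  | nil => simp
  | cons x t ih =>
    simp only [List.any_cons, ih, List.map_cons, List.mem_cons]
    by_cases hx : x.1 = c
    · simp [hx, eq_comm]
    · simp only [beq_eq_false_iff_ne.mpr hx, Bool.false_or]
      have h2 : ¬ c = x.1 := fun h => hx h.symm
      simp [h2]

lemma contains_pvPairs (p : List Char) (c : Char) :
    (PySem.Dict.mk (pvPairs p)).contains c = decide (c ∈ p) := by
  show ((pvPairs p).any fun q => q.1 == c) = decide (c ∈ p)
  rw [any_fst_beq, map_fst_pvPairs]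
  simp only [decide_eq_decide]
  exact PySem.Set.mem_ofList p c

lemma pvPairs_append_mem (p : List Char) (c : Char) (hc : c ∈ p) :
    pvPairs (p ++ [c]) = pvPairs p := by
  rw [pvPairs, pvPairs, dedup_append_singleton, if_pos hc]

lemma pvPairs_append_not_mem (p : List Char) (c : Char) (hc : c ∉ p) :
    pvPairs (p ++ [c]) = pvPairs p ++ [(c, ((PySem.List.dedup p).length : Int) + 1)] := by
  rw [pvPairs, dedup_append_singleton, if_neg hc, PySem.List.enumerate_append]
  simp [pvPairs, PySem.List.enumerate_cons]

lemma colorCodeStep_state (p : List Char) (c : Char) (acc : List String) :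
    colorCodeStep (PySem.Dict.mk (pvPairs p), ((PySem.List.dedup p).length : Int), acc) c
      = (PySem.Dict.mk (pvPairs (p ++ [c])), ((PySem.List.dedup (p ++ [c])).length : Int),
         acc ++ [PySem.Int.toStr (pvCode (p ++ [c]) c)]) := by
  by_cases hc : c ∈ p
  · have hcon : (PySem.Dict.mk (pvPairs p)).contains c = true := by
      rw [contains_pvPairs]; simp [hc]
    simp only [colorCodeStep, hcon, if_true, pvPairs_append_mem p c hc,
      dedup_append_singleton, if_pos hc, pvCode]
    rw [show (PySem.Dict.mk (pvPairs p)).get? c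
          = (List.idxOf? c (PySem.List.dedup p)).map (fun k => 0 + (k : Int) + 1) from
        get?_enumMap (PySem.List.dedup p) 0 c]
    simp
  · have hcon : (PySem.Dict.mk (pvPairs p)).contains c = false := by
      rw [contains_pvPairs]; simp [hc]
    have hins : (PySem.Dict.mk (pvPairs p)).insert c (((PySem.List.dedup p).length : Int) + 1)
        = PySem.Dict.mk (pvPairs (p ++ [c])) := by
      rw [PySem.Dict.insert]
      simp only [show (PySem.Dict.mk (pvPairs p)).contains c = false from hcon]
      rw [pvPairs_append_not_mem p c hc]
      simp
    have hidx : List.idxOf? c (PySem.List.dedup (p ++ [c]))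
        = some (PySem.List.dedup p).length := by
      rw [dedup_append_singleton, if_neg hc, ← PySem.List.index?_eq_idxOf?]
      exact PySem.List.index?_append_singleton_self (PySem.List.dedup p) c
        (fun hm => hc ((PySem.Set.mem_ofList p c).mp hm))
    simp only [colorCodeStep, hcon, Bool.false_eq_true, if_false, hins, pvCode, hidx]
    have hlen : PySem.List.dedup (p ++ [c]) = PySem.List.dedup p ++ [c] := by
      rw [dedup_append_singleton, if_neg hc]
    rw [hlen]
    have hget : (PySem.Dict.mk (pvPairs (p ++ [c]))).get? c
        = (List.idxOf? c (PySem.List.dedup (p ++ [c]))).map (fun k => 0 + (k : Int) + 1) :=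
      get?_enumMap (PySem.List.dedup (p ++ [c])) 0 c
    rw [hlen] at hidx
    rw [hget, hlen] at *
    rw [hidx]
    simp

lemma mainA : ∀ (l p : List Char) (acc : List String),
    List.foldl colorCodeStep
      (PySem.Dict.mk (pvPairs p), ((PySem.List.dedup p).length : Int), acc) l
      = (PySem.Dict.mk (pvPairs (p ++ l)), ((PySem.List.dedup (p ++ l)).length : Int),
         acc ++ l.map (fun c => PySem.Int.toStr (pvCode (p ++ l) c))) := by
  intro l
  induction l with
  | nil => intro p acc; simp
  | cons c l ih =>
    intro p acc
    rw [List.foldl_cons, colorCodeStep_state, ih (p ++ [c])]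
    have hassoc : (p ++ [c]) ++ l = p ++ c :: l := by simp
    rw [hassoc]
    have hv : pvCode (p ++ [c]) c = pvCode (p ++ c :: l) c := by
      unfold pvCode
      rw [show p ++ c :: l = (p ++ [c]) ++ l by simp,
          idxOf?_dedup_stable (p ++ [c]) l c (by simp)]
    rw [hv]; simp

-- first match in a key→(key, f key) table depends only on the key
lemma get?_mk_map_self (l : List Char) (f : Char → Int) (c : Char) (hc : c ∈ l) :
    (PySem.Dict.mk (l.map (fun x => (x, f x)))).get? c = some (f c) := by
  induction l with
  | nil => cases hc
  | cons x t ih =>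
    simp only [List.map_cons, PySem.Dict.get?_mk_cons]
    by_cases hx : x = c
    · simp [hx]
    · have : c ∈ t := by cases hc with
        | head => exact absurd rfl hx
        | tail _ h => exact h
      simp [hx, ih this]

lemma update_fresh : ∀ (pairs : List (Char × Int)) (d : PySem.Dict Char Int),
    (pairs.map Prod.fst).Nodup → (∀ k ∈ pairs.map Prod.fst, d.contains k = false) →
    d.update pairs = PySem.Dict.mk (d.items ++ pairs) := by
  intro pairs
  induction pairs with
  | nil => intro d _ _; simp [PySem.Dict.update]
  | cons kv rest ih =>
    intro d hnd hfresh
    have hk : d.contains kv.1 = false := hfresh kv.1 (by simp)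
    have hins : d.insert kv.1 kv.2 = PySem.Dict.mk (d.items ++ [kv]) := by
      rw [PySem.Dict.insert]
      simp [hk]
    have hstep : d.update (kv :: rest) = (d.insert kv.1 kv.2).update rest := rfl
    rw [hstep, hins, ih _ (by simpa using hnd.of_cons)]
    · simp
    · intro k hkmem
      show ((d.items ++ [kv]).any fun p => p.1 == k) = false
      rw [List.any_append]
      have h1 : (d.items.any fun p => p.1 == k) = false := hfresh k (by simp [hkmem])
      have h2 : k ≠ kv.1 := by
        simp only [List.map_cons, List.nodup_cons] at hnd
        exact fun h => hnd.1 (h ▸ hkmem)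
      have h3 : (kv.1 == k) = false := beq_eq_false_iff_ne.mpr (fun h => h2 h.symm)
      simp [h1, h3]

lemma ofList_nodup_keys (pairs : List (Char × Int)) (h : (pairs.map Prod.fst).Nodup) :
    PySem.Dict.ofList pairs = PySem.Dict.mk pairs := by
  rw [PySem.Dict.ofList, update_fresh pairs PySem.Dict.empty h (fun _ _ => rfl)]
  rfl

-- an occurrence of c at index i yields the prefix [c] at cs.drop i
lemma singleton_prefix_drop (cs : List Char) (i : Nat) (hi : i < cs.length)
    (hc : cs[i] = c) : [c] <+: cs.drop i := by
  rw [List.drop_eq_getElem_cons hi, hc]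
  exact ⟨cs.drop (i + 1), rfl⟩

-- B's per-letter value: |set(word[:find(c)+1])| = first-seen rank of c
lemma rank_eq (cs : List Char) (c : Char) (hc : c ∈ cs) :
    PySem.Set.len (PySem.Set.ofList
        (PySem.List.slice cs none (some (PySem.Chars.find cs [c] + 1))))
      = pvCode cs c := by
  have hinf : [c] <:+: cs := by
    obtain ⟨s, t, hst⟩ := List.append_of_mem hc
    exact ⟨s, t, by simp [hst]⟩
  have h0 : 0 ≤ PySem.Chars.find cs [c] := (PySem.Chars.find_nonneg_iff cs [c]).mpr hinf
  obtain ⟨hpre, hmin⟩ := PySem.Chars.find_spec h0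
  set k := (PySem.Chars.find cs [c]).toNat with hk
  have hfind : PySem.Chars.find cs [c] = (k : Int) := (Int.toNat_of_nonneg h0).symm
  have hkl : k < cs.length := by
    by_contra h
    have : cs.drop k = [] := List.drop_eq_nil_of_le (by omega)
    rw [this] at hpre
    exact absurd (List.prefix_nil.mp hpre) (by simp)
  have hck : cs[k] = c := by
    obtain ⟨t, ht⟩ := hpre
    rw [List.drop_eq_getElem_cons hkl] at ht
    exact (List.cons.injEq _ _ _ _ ▸ ht :  _ ∧ _).1.symm
  -- take (k+1) cs = take k cs ++ [c]
  have htake : cs.take (k + 1) = cs.take k ++ [c] := by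
    rw [List.take_add_one]
    simp [List.getElem?_eq_getElem hkl, hck]
  have hslice : PySem.List.slice cs none (some (PySem.Chars.find cs [c] + 1))
      = cs.take (k + 1) := by
    rw [PySem.List.slice_to cs (by omega), hfind]
    norm_num
  have hnot : c ∉ cs.take k := by
    intro hmem
    obtain ⟨i, hi, hie⟩ := List.getElem_of_mem hmem
    have hilt : i < k := lt_of_lt_of_le hi (by simp [List.length_take])
    have hii : i < cs.length := lt_trans hilt hkl
    have : cs[i] = c := by
      rw [← hie]; exact (List.getElem_take).symm
    exact hmin i hilt (singleton_prefix_drop cs i hii this)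
  have hded : PySem.List.dedup (cs.take k ++ [c]) = PySem.List.dedup (cs.take k) ++ [c] := by
    rw [dedup_append_singleton, if_neg hnot]
  have hsplit : cs = (cs.take k ++ [c]) ++ cs.drop (k + 1) := by
    have h1 : cs = cs.take (k + 1) ++ cs.drop (k + 1) := (List.take_append_drop _ _).symm
    rw [htake] at h1; exact h1
  have hidx : List.idxOf? c (PySem.List.dedup cs)
      = some (PySem.List.dedup (cs.take k)).length := by
    conv_lhs => rw [hsplit]
    rw [idxOf?_dedup_stable (cs.take k ++ [c]) (cs.drop (k + 1)) c (by simp)]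
    rw [hded, ← PySem.List.index?_eq_idxOf?]
    exact PySem.List.index?_append_singleton_self _ c
      (fun hm => hnot ((PySem.Set.mem_ofList _ c).mp hm))
  rw [hslice, htake]
  unfold pvCode
  rw [hidx]
  simp only [PySem.Set.len, ← PySem.List.dedup_eq_ofList]
  rw [hded]
  simp

-- ===== VERDICT (by name: the statement is the Claim_ definition above) =====
theorem colorCode_spec : Claim_equal_colorCode := by
  intro word _
  show colorCode word = colorCode_alt word
  simp only [colorCode, colorCode_alt]
  rw [PySem.Str.len_eq,
      PySem.List.foldl_pyRange_zero_pyGetD' word.toList ' ' colorCodeStep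
        (PySem.Dict.empty, 0, [])]
  rw [show ((PySem.Dict.empty : PySem.Dict Char Int), (0 : Int), ([] : List String))
        = (PySem.Dict.mk (pvPairs []), ((PySem.List.dedup ([] : List Char)).length : Int),
           ([] : List String)) from rfl]
  rw [mainA word.toList [] []]
  simp only [List.nil_append]
  congr 1
  apply List.map_congr_left
  intro c hcmem
  have hkeys : ((PySem.Set.ofList word.toList).map (fun c =>
      (c, PySem.Set.len (PySem.Set.ofList
        (PySem.List.slice word.toList none (some (PySem.Chars.find word.toList [c] + 1))))))).map
      Prod.fst = PySem.Set.ofList word.toList := by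
    simp [Function.comp_def]
  rw [ofList_nodup_keys _ (by rw [hkeys]; exact PySem.List.nodup_dedup word.toList)]
  rw [get?_mk_map_self _ _ c ((PySem.Set.mem_ofList _ c).mpr hcmem)]
  rw [rank_eq word.toList c hcmem]
  simp
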